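-- pv_equiv track=rewrite | github.com/LucasAWeber/PythonChess | Chess.py | bishop_moves
-- ===== SOURCE A (Python) =====
-- def bishop_moves(board, s_row, s_col, row, column):
--     pospos = True
--     posneg = True
--     negpos = True
--     negneg = True
--     for i in range(1, column):
--         if 0 <= s_row + i < row and 0 <= s_col + i < column and pospos:
--             board[s_row + i][s_col + i] += 50
--             if board[s_row + i][s_col + i] != 0:
--                 pospos = False
--         if 0 <= s_row - i < row and 0 <= s_col - i < column and negneg:
--             board[s_row - i][s_col - i] += 50
--             if board[s_row - i][s_col - i] != 0:
--                 negneg = False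
--         if 0 <= s_row + i < row and 0 <= s_col - i < column and posneg:
--             board[s_row + i][s_col - i] += 50
--             if board[s_row + i][s_col - i] != 0:
--                 posneg = False
--         if 0 <= s_row - i < row and 0 <= s_col + i < column and negpos:
--             board[s_row - i][s_col + i] += 50
--             if board[s_row - i][s_col + i] != 0:
--                 negpos = False
--     return board
-- ===== SOURCE B (Python) =====
-- def bishop_moves(board, s_row, s_col, row, column):
--     # Two-phase per diagonal: compute the closed-form in-bounds step interval
--     # [lo, hi], read-scan the original values for the stopping step m (first
--     # cell whose value is not -50, since +=50 then !=0 stops exactly there),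
--     # then bulk-write +=50 to steps lo..m.  Mutates board in place like A.
--     for dr, dc in ((1, 1), (-1, -1), (1, -1), (-1, 1)):
--         if dr == 1:
--             rlo, rhi = -s_row, row - 1 - s_row
--         else:
--             rlo, rhi = s_row - (row - 1), s_row
--         if dc == 1:
--             clo, chi = -s_col, column - 1 - s_col
--         else:
--             clo, chi = s_col - (column - 1), s_col
--         lo = max(1, rlo, clo)
--         hi = min(column - 1, rhi, chi)
--         m = hi
--         for i in range(lo, hi + 1):
--             if board[s_row + dr * i][s_col + dc * i] != -50:
--                 m = i
--                 break
--         for i in range(lo, m + 1):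
--             board[s_row + dr * i][s_col + dc * i] += 50
--     return board
-- ===== Notes on version B (the rewrite author's own statement) =====
-- stated objective: alternative
-- what changed: B replaces A's interleaved guarded write-then-test loop with four boolean flags by a two-phase plan per diagonal: it computes the closed-form in-bounds step interval [lo, hi] arithmetically, scans the original values read-only for the stopping step (the first cell whose value is not -50), then bulk-writes +=50 to steps lo..m; per diagonal it touches only min(row,column) cells instead of iterating all of range(1, column).
import Mathlib
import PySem

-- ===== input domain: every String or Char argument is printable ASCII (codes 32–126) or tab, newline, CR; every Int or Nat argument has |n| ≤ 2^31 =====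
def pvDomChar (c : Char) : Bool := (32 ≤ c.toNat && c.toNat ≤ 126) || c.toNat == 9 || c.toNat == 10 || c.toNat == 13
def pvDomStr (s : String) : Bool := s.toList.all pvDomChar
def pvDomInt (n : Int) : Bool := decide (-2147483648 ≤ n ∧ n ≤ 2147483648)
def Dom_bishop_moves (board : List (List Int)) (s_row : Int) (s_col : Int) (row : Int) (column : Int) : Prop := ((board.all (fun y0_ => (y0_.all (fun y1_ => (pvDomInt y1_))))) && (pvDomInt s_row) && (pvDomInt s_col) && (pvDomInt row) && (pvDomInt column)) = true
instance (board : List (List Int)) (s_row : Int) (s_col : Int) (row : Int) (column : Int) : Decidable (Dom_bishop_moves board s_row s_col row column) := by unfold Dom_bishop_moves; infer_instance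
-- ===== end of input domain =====

-- B marks each diagonal in two phases — closed-form in-bounds step interval [lo, hi],
-- a read-only scan of the original values for the stopping step, then one bulk write —
-- instead of A's interleaved guarded write-then-test loop with four boolean flags
-- (objective: alternative).  Both Pythons mutate `board` in place and return it; the
-- equivalence proved here is about the returned (= final) board.

-- ===== PORT A =====
-- board[r][c] += 50 (indices guarded nonnegative by A's bounds check and, under Pre_, in range)
def pvAddAt (b : List (List Int)) (r c : Int) : List (List Int) :=
  b.modify r.toNat (fun rw => rw.modify c.toNat (· + 50))

-- read board[r][c] (indices guarded nonnegative and, under Pre_, in range)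
def pvGetAt (b : List (List Int)) (r c : Int) : Int :=
  (b.getD r.toNat []).getD c.toNat 0

def bishop_moves (board : List (List Int)) (s_row : Int) (s_col : Int) (row : Int) (column : Int) : List (List Int) :=
  ((PySem.List.pyRange 1 column 1).foldl
    (fun (st : List (List Int) × Bool × Bool × Bool × Bool) (i : Int) =>
      let b0 := st.1
      let pospos := st.2.1
      let negneg := st.2.2.1
      let posneg := st.2.2.2.1
      let negpos := st.2.2.2.2
      let p1 :=
        if 0 ≤ s_row + i ∧ s_row + i < row ∧ 0 ≤ s_col + i ∧ s_col + i < column ∧ pospos = true then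
          let b' := pvAddAt b0 (s_row + i) (s_col + i)
          (b', if pvGetAt b' (s_row + i) (s_col + i) ≠ 0 then false else pospos)
        else (b0, pospos)
      let p2 :=
        if 0 ≤ s_row - i ∧ s_row - i < row ∧ 0 ≤ s_col - i ∧ s_col - i < column ∧ negneg = true then
          let b' := pvAddAt p1.1 (s_row - i) (s_col - i)
          (b', if pvGetAt b' (s_row - i) (s_col - i) ≠ 0 then false else negneg)
        else (p1.1, negneg)
      let p3 :=
        if 0 ≤ s_row + i ∧ s_row + i < row ∧ 0 ≤ s_col - i ∧ s_col - i < column ∧ posneg = true then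
          let b' := pvAddAt p2.1 (s_row + i) (s_col - i)
          (b', if pvGetAt b' (s_row + i) (s_col - i) ≠ 0 then false else posneg)
        else (p2.1, posneg)
      let p4 :=
        if 0 ≤ s_row - i ∧ s_row - i < row ∧ 0 ≤ s_col + i ∧ s_col + i < column ∧ negpos = true then
          let b' := pvAddAt p3.1 (s_row - i) (s_col + i)
          (b', if pvGetAt b' (s_row - i) (s_col + i) ≠ 0 then false else negpos)
        else (p3.1, negpos)
      (p4.1, p1.2, p2.2, p3.2, p4.2))
    (board, true, true, true, true)).1

-- ===== PORT B =====
-- the scan `m = hi; for i in range(lo, hi+1): if board[..] != -50: m = i; break`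
def pvFindStop (b : List (List Int)) (s_row s_col dr dc : Int) : List Int → Int → Int
  | [], m => m
  | i :: rest, m =>
    if pvGetAt b (s_row + dr * i) (s_col + dc * i) ≠ -50 then i
    else pvFindStop b s_row s_col dr dc rest m

def bishop_moves_alt (board : List (List Int)) (s_row : Int) (s_col : Int) (row : Int) (column : Int) : List (List Int) :=
  [((1 : Int), (1 : Int)), (-1, -1), (1, -1), (-1, 1)].foldl
    (fun b d =>
      let rlo := if d.1 = 1 then -s_row else s_row - (row - 1)
      let rhi := if d.1 = 1 then row - 1 - s_row else s_row
      let clo := if d.2 = 1 then -s_col else s_col - (column - 1)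
      let chi := if d.2 = 1 then column - 1 - s_col else s_col
      let lo := max 1 (max rlo clo)
      let hi := min (column - 1) (min rhi chi)
      let m := pvFindStop b s_row s_col d.1 d.2 (PySem.List.pyRange lo (hi + 1) 1) hi
      (PySem.List.pyRange lo (m + 1) 1).foldl
        (fun b2 i => pvAddAt b2 (s_row + d.1 * i) (s_col + d.2 * i)) b)
    board

-- ===== PRECONDITION & SPEC =====
-- cell (r, c) exists in the (possibly ragged) board
abbrev pvCellOk (b : List (List Int)) (r c : Int) : Prop :=
  r.toNat < b.length ∧ c.toNat < (b.getD r.toNat []).length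

-- the closed-form interval [pvLo, pvHi] of in-bounds steps of a diagonal
def pvLo (s_row s_col row column dr dc : Int) : Int :=
  max 1 (max (if dr = 1 then -s_row else s_row - (row - 1))
             (if dc = 1 then -s_col else s_col - (column - 1)))
def pvHi (s_row s_col row column dr dc : Int) : Int :=
  min (column - 1) (min (if dr = 1 then row - 1 - s_row else s_row)
             (if dc = 1 then column - 1 - s_col else s_col))

-- along one diagonal: every in-bounds cell reached while all earlier in-bounds cells still
-- hold -50 (i.e. every cell up to and including the ray's stopping cell) exists; the step
-- index is capped at pvLo + board.length, beyond which the premise is impossible (each of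
-- the board.length + 1 earlier -50-cells would need its own distinct existing row)
abbrev pvPreDir (b : List (List Int)) (s_row s_col row column dr dc : Int) : Prop :=
  ∀ i ∈ PySem.List.pyRange (pvLo s_row s_col row column dr dc)
      (min (pvHi s_row s_col row column dr dc) (pvLo s_row s_col row column dr dc + (b.length : Int)) + 1) 1,
    (∀ j ∈ PySem.List.pyRange (pvLo s_row s_col row column dr dc) i 1,
      pvGetAt b (s_row + dr * j) (s_col + dc * j) = -50) →
    pvCellOk b (s_row + dr * i) (s_col + dc * i)

-- Pre_ excludes exactly the inputs on which A raises IndexError: along some diagonal an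
-- in-bounds cell missing from the ragged board is reached before (or as) the ray's stopping
-- cell, the first whose value is not -50; everywhere A returns, Pre_ holds (and B returns too).
def Pre_bishop_moves (board : List (List Int)) (s_row : Int) (s_col : Int) (row : Int) (column : Int) : Prop :=
  pvPreDir board s_row s_col row column 1 1 ∧ pvPreDir board s_row s_col row column (-1) (-1) ∧
  pvPreDir board s_row s_col row column 1 (-1) ∧ pvPreDir board s_row s_col row column (-1) 1

instance (board : List (List Int)) (s_row : Int) (s_col : Int) (row : Int) (column : Int) : Decidable (Pre_bishop_moves board s_row s_col row column) := by
  unfold Pre_bishop_moves; infer_instance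

def pvWitness_bishop_moves : List (List Int) × Int × Int × Int × Int := ([[0, 0], [0, 0]], 0, 0, 2, 2)

def Spec_bishop_moves (board : List (List Int)) (s_row : Int) (s_col : Int) (row : Int) (column : Int) (out : List (List Int)) : Prop := out = bishop_moves_alt board s_row s_col row column
instance (board : List (List Int)) (s_row : Int) (s_col : Int) (row : Int) (column : Int) (out : List (List Int)) : Decidable (Spec_bishop_moves board s_row s_col row column out) := by unfold Spec_bishop_moves; infer_instance

-- ===== CLAIM (what is proved, stated in full; the proofs are below) =====
def Claim_equal_bishop_moves : Prop := ∀ (board : List (List Int)) (s_row : Int) (s_col : Int) (row : Int) (column : Int), Dom_bishop_moves board s_row s_col row column → Pre_bishop_moves board s_row s_col row column → Spec_bishop_moves board s_row s_col row column (bishop_moves board s_row s_col row column)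

-- ===== LEMMAS AND PROOFS =====

-- one diagonal ray of A, in isolation: guarded `+= 50` then stop when nonzero
def pvRunDir (s_row s_col row column dr dc : Int) : List Int → List (List Int) → List (List Int)
  | [], b => b
  | i :: rest, b =>
    if 0 ≤ s_row + dr * i ∧ s_row + dr * i < row ∧ 0 ≤ s_col + dc * i ∧ s_col + dc * i < column then
      let b' := pvAddAt b (s_row + dr * i) (s_col + dc * i)
      if pvGetAt b' (s_row + dr * i) (s_col + dc * i) ≠ 0 then b'
      else pvRunDir s_row s_col row column dr dc rest b'
    else pvRunDir s_row s_col row column dr dc rest b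

-- the prefix of the ray A actually writes: everything up to and including the first
-- cell whose current value is not -50
def pvTakeStop (b : List (List Int)) (s_row s_col dr dc : Int) : List Int → List Int
  | [] => []
  | i :: rest =>
    if pvGetAt b (s_row + dr * i) (s_col + dc * i) ≠ -50 then [i]
    else i :: pvTakeStop b s_row s_col dr dc rest

-- one whole phase of B (the loop body of bishop_moves_alt at direction (dr, dc))
def pvPhaseB (s_row s_col row column dr dc : Int) (b : List (List Int)) : List (List Int) :=
  (PySem.List.pyRange (pvLo s_row s_col row column dr dc)
      (pvFindStop b s_row s_col dr dc
        (PySem.List.pyRange (pvLo s_row s_col row column dr dc) (pvHi s_row s_col row column dr dc + 1) 1)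
        (pvHi s_row s_col row column dr dc) + 1) 1).foldl
    (fun b2 i => pvAddAt b2 (s_row + dr * i) (s_col + dc * i)) b

theorem pvModify_comm {α : Type} (l : List α) (i j : Nat) (f g : α → α) (h : i ≠ j) :
    (l.modify i f).modify j g = (l.modify j g).modify i f := by
  apply List.ext_getElem?
  intro k
  simp only [List.getElem?_modify]
  cases l[k]? with
  | none => rfl
  | some a => by_cases h1 : i = k <;> by_cases h2 : j = k <;> simp_all

theorem pvModify_modify_same {α : Type} (l : List α) (i : Nat) (f g : α → α) :
    (l.modify i f).modify i g = l.modify i (fun x => g (f x)) := by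
  apply List.ext_getElem?
  intro k
  simp only [List.getElem?_modify]
  cases l[k]? with
  | none => rfl
  | some a => by_cases h1 : i = k <;> simp_all

theorem pvGetD_modify_ne {α : Type} (l : List α) (i j : Nat) (f : α → α) (d : α) (h : i ≠ j) :
    (l.modify i f).getD j d = l.getD j d := by
  simp only [List.getD_eq_getElem?_getD, List.getElem?_modify]
  cases l[j]? with
  | none => rfl
  | some a => simp [h]

theorem pvGetAt_pvAddAt_ne (b : List (List Int)) (r1 c1 r2 c2 : Int)
    (h : r1.toNat ≠ r2.toNat ∨ c1.toNat ≠ c2.toNat) :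
    pvGetAt (pvAddAt b r2 c2) r1 c1 = pvGetAt b r1 c1 := by
  unfold pvGetAt pvAddAt
  rcases eq_or_ne r1.toNat r2.toNat with he | hne
  · have hc : c1.toNat ≠ c2.toNat := by
      rcases h with h | h
      · exact absurd he h
      · exact h
    rw [he]
    simp only [List.getD_eq_getElem?_getD, List.getElem?_modify]
    cases b[r2.toNat]? with
    | none => rfl
    | some rw_ =>
      simp
      rw [← List.getD_eq_getElem?_getD, ← List.getD_eq_getElem?_getD]
      exact pvGetD_modify_ne rw_ c2.toNat c1.toNat _ 0 (Ne.symm hc)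
  · rw [pvGetD_modify_ne b r2.toNat r1.toNat _ [] (Ne.symm hne)]

theorem pvAddAt_length (b : List (List Int)) (r c : Int) : (pvAddAt b r c).length = b.length := by
  simp [pvAddAt]

theorem pvAddAt_rowlen (b : List (List Int)) (r c : Int) (t : Nat) :
    ((pvAddAt b r c).getD t []).length = (b.getD t []).length := by
  unfold pvAddAt
  simp only [List.getD_eq_getElem?_getD, List.getElem?_modify]
  cases hb : b[t]? with
  | none => simp
  | some rw_ => by_cases h : r.toNat = t <;> simp [h]

theorem pvOk_pvAddAt (b : List (List Int)) (r c r' c' : Int) :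
    pvCellOk (pvAddAt b r c) r' c' ↔ pvCellOk b r' c' := by
  unfold pvCellOk
  rw [pvAddAt_length, pvAddAt_rowlen]

theorem pvGetAt_not_ok (b : List (List Int)) (r c : Int) (h : ¬ pvCellOk b r c) :
    pvGetAt b r c = 0 := by
  unfold pvGetAt
  by_cases hr : r.toNat < b.length
  · by_cases hc : c.toNat < (b.getD r.toNat []).length
    · exact absurd ⟨hr, hc⟩ h
    · exact List.getD_eq_default _ _ (Nat.le_of_not_lt hc)
  · rw [List.getD_eq_default _ _ (Nat.le_of_not_lt hr)]
    rfl

theorem pvGetAt_pvAddAt_self (b : List (List Int)) (r c : Int) (h : pvCellOk b r c) :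
    pvGetAt (pvAddAt b r c) r c = pvGetAt b r c + 50 := by
  obtain ⟨h1, h2⟩ := h
  have hrow : b.getD r.toNat [] = b[r.toNat] := by
    rw [List.getD_eq_getElem?_getD, List.getElem?_eq_getElem h1]
    rfl
  rw [hrow] at h2
  unfold pvGetAt pvAddAt
  rw [hrow]
  have hmod : (b.modify r.toNat (fun rw_ => rw_.modify c.toNat (· + 50))).getD r.toNat []
      = b[r.toNat].modify c.toNat (· + 50) := by
    rw [List.getD_eq_getElem?_getD, List.getElem?_modify]
    simp [List.getElem?_eq_getElem h1]
  rw [hmod]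
  rw [List.getD_eq_getElem?_getD, List.getD_eq_getElem?_getD,
      List.getElem?_modify]
  simp [List.getElem?_eq_getElem h2]

-- folds of pvAddAt preserve the shape of the board
theorem pvOk_foldl (s_row s_col dr dc : Int) (L : List Int) (b : List (List Int)) (r c : Int) :
    pvCellOk (L.foldl (fun b2 i => pvAddAt b2 (s_row + dr * i) (s_col + dc * i)) b) r c ↔
      pvCellOk b r c := by
  induction L generalizing b with
  | nil => rfl
  | cons a t ih => simp only [List.foldl_cons]; rw [ih, pvOk_pvAddAt]

theorem pvGetAt_foldl_ne (s_row s_col dr dc : Int) (L : List Int) (b : List (List Int)) (r c : Int)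
    (h : ∀ i ∈ L, (s_row + dr * i).toNat ≠ r.toNat ∨ (s_col + dc * i).toNat ≠ c.toNat) :
    pvGetAt (L.foldl (fun b2 i => pvAddAt b2 (s_row + dr * i) (s_col + dc * i)) b) r c =
      pvGetAt b r c := by
  induction L generalizing b with
  | nil => rfl
  | cons a t ih =>
    simp only [List.foldl_cons]
    rw [ih _ (fun i hi => h i (by simp [hi])),
        pvGetAt_pvAddAt_ne b r c _ _ (by
          rcases h a (by simp) with hh | hh
          · exact Or.inl (Ne.symm hh)
          · exact Or.inr (Ne.symm hh))]

theorem pvTakeStop_congr (b1 b2 : List (List Int)) (s_row s_col dr dc : Int) (ms : List Int)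
    (h : ∀ i ∈ ms, pvGetAt b1 (s_row + dr * i) (s_col + dc * i) = pvGetAt b2 (s_row + dr * i) (s_col + dc * i)) :
    pvTakeStop b1 s_row s_col dr dc ms = pvTakeStop b2 s_row s_col dr dc ms := by
  induction ms with
  | nil => rfl
  | cons a t ih =>
    simp only [pvTakeStop]
    rw [h a (by simp), ih (fun i hi => h i (by simp [hi]))]

theorem pvFindStop_ge (b : List (List Int)) (s_row s_col dr dc lo d : Int) (l : List Int)
    (h : ∀ x ∈ l, lo ≤ x) (hd : lo ≤ d) : lo ≤ pvFindStop b s_row s_col dr dc l d := by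
  induction l with
  | nil => exact hd
  | cons a t ih =>
    simp only [pvFindStop]
    split_ifs
    · exact h a (by simp)
    · exact ih (fun x hx => h x (by simp [hx]))

theorem pvFindStop_le (b : List (List Int)) (s_row s_col dr dc K d : Int) (l : List Int)
    (h : ∀ x ∈ l, x ≤ K) (hd : d ≤ K) : pvFindStop b s_row s_col dr dc l d ≤ K := by
  induction l with
  | nil => exact hd
  | cons a t ih =>
    simp only [pvFindStop]
    split_ifs
    · exact h a (by simp)
    · exact ih (fun x hx => h x (by simp [hx]))

-- B's scan + bulk range is exactly the take-until-stop prefix of the interval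
theorem pvFindStop_range (b : List (List Int)) (s_row s_col dr dc hi : Int) :
    ∀ (n : Nat) (lo : Int), (hi + 1 - lo).toNat ≤ n →
    PySem.List.pyRange lo (pvFindStop b s_row s_col dr dc (PySem.List.pyRange lo (hi + 1) 1) hi + 1) 1
      = pvTakeStop b s_row s_col dr dc (PySem.List.pyRange lo (hi + 1) 1) := by
  intro n
  induction n with
  | zero =>
    intro lo hn
    rw [show PySem.List.pyRange lo (hi + 1) 1 = [] from PySem.List.pyRange_one_eq_nil (by omega)]
    simp only [pvFindStop, pvTakeStop]
    exact PySem.List.pyRange_one_eq_nil (by omega)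
  | succ n ih =>
    intro lo hn
    by_cases hlt : lo < hi + 1
    · rw [show PySem.List.pyRange lo (hi + 1) 1 = lo :: PySem.List.pyRange (lo + 1) (hi + 1) 1
            from PySem.List.pyRange_one_cons hlt]
      simp only [pvFindStop, pvTakeStop]
      split_ifs with hv
      · rw [PySem.List.pyRange_one_cons (a := lo) (b := lo + 1) (by omega),
            PySem.List.pyRange_one_eq_nil (a := lo + 1) (b := lo + 1) (by omega)]
      · have hge : lo ≤ pvFindStop b s_row s_col dr dc (PySem.List.pyRange (lo + 1) (hi + 1) 1) hi :=
          pvFindStop_ge b s_row s_col dr dc lo hi _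
            (fun x hx => by have := (PySem.List.mem_pyRange_one.mp hx).1; omega) (by omega)
        rw [PySem.List.pyRange_one_cons
            (a := lo) (b := pvFindStop b s_row s_col dr dc (PySem.List.pyRange (lo + 1) (hi + 1) 1) hi + 1)
            (by omega)]
        rw [ih (lo + 1) (by omega)]
    · rw [show PySem.List.pyRange lo (hi + 1) 1 = [] from PySem.List.pyRange_one_eq_nil (by omega)]
      simp only [pvFindStop, pvTakeStop]
      exact PySem.List.pyRange_one_eq_nil (by omega)

theorem pvRunDir_skip (s_row s_col row column dr dc : Int) (l : List Int) (b : List (List Int))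
    (h : ∀ i ∈ l, ¬(0 ≤ s_row + dr * i ∧ s_row + dr * i < row ∧ 0 ≤ s_col + dc * i ∧ s_col + dc * i < column)) :
    pvRunDir s_row s_col row column dr dc l b = b := by
  induction l with
  | nil => rfl
  | cons a t ih =>
    simp only [pvRunDir]
    rw [if_neg (h a (by simp))]
    exact ih (fun i hi => h i (by simp [hi]))

theorem pvRunDir_append_skip (s_row s_col row column dr dc : Int) (l1 l2 : List Int) (b : List (List Int))
    (h : ∀ i ∈ l1, ¬(0 ≤ s_row + dr * i ∧ s_row + dr * i < row ∧ 0 ≤ s_col + dc * i ∧ s_col + dc * i < column)) :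
    pvRunDir s_row s_col row column dr dc (l1 ++ l2) b = pvRunDir s_row s_col row column dr dc l2 b := by
  induction l1 generalizing b with
  | nil => rfl
  | cons a t ih =>
    simp only [List.cons_append, pvRunDir]
    rw [if_neg (h a (by simp))]
    exact ih b (fun i hi => h i (by simp [hi]))

-- the core: one ray of A, on a run of in-bounds steps followed by out-of-bounds tail,
-- writes exactly the take-until-stop prefix
theorem pvRunDir_eq_takeStop (s_row s_col row column dr dc : Int) (ms l3 : List Int)
    (hdr : dr = 1 ∨ dr = -1) :
    ∀ (b : List (List Int)),
    ms.Pairwise (· < ·) →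
    (∀ i ∈ ms, 0 ≤ s_row + dr * i ∧ s_row + dr * i < row ∧ 0 ≤ s_col + dc * i ∧ s_col + dc * i < column) →
    (∀ i ∈ ms, (∀ j ∈ ms, j < i → pvGetAt b (s_row + dr * j) (s_col + dc * j) = -50) →
      pvCellOk b (s_row + dr * i) (s_col + dc * i)) →
    (∀ i ∈ l3, ¬(0 ≤ s_row + dr * i ∧ s_row + dr * i < row ∧ 0 ≤ s_col + dc * i ∧ s_col + dc * i < column)) →
    pvRunDir s_row s_col row column dr dc (ms ++ l3) b
      = (pvTakeStop b s_row s_col dr dc ms).foldl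
          (fun b2 i => pvAddAt b2 (s_row + dr * i) (s_col + dc * i)) b := by
  induction ms with
  | nil =>
    intro b _ _ _ hl3
    simp only [List.nil_append, pvTakeStop, List.foldl_nil]
    exact pvRunDir_skip _ _ _ _ _ _ _ _ hl3
  | cons a t ih =>
    intro b hasc hinb hok hl3
    have hlt : ∀ j ∈ t, a < j := (List.pairwise_cons.mp hasc).1
    have hinba := hinb a (by simp)
    have hoka : pvCellOk b (s_row + dr * a) (s_col + dc * a) := by
      apply hok a (by simp)
      intro j hj hja
      rcases List.mem_cons.mp hj with rfl | hjt
      · omega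
      · exact absurd hja (by have := hlt j hjt; omega)
    simp only [List.cons_append, pvRunDir, pvTakeStop]
    rw [if_pos hinba]
    have hread := pvGetAt_pvAddAt_self b (s_row + dr * a) (s_col + dc * a) hoka
    by_cases hv : pvGetAt b (s_row + dr * a) (s_col + dc * a) ≠ -50
    · rw [if_pos (by rw [hread]; omega : pvGetAt (pvAddAt b (s_row + dr * a) (s_col + dc * a)) (s_row + dr * a) (s_col + dc * a) ≠ 0),
          if_pos hv]
      simp
    · rw [not_ne_iff] at hv
      rw [if_neg (by rw [hread, hv]; norm_num :
            ¬ pvGetAt (pvAddAt b (s_row + dr * a) (s_col + dc * a)) (s_row + dr * a) (s_col + dc * a) ≠ 0),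
          if_neg (by rw [hv]; simp : ¬ pvGetAt b (s_row + dr * a) (s_col + dc * a) ≠ -50)]
      set b' := pvAddAt b (s_row + dr * a) (s_col + dc * a) with hb'
      have hvals : ∀ j ∈ t, pvGetAt b' (s_row + dr * j) (s_col + dc * j)
          = pvGetAt b (s_row + dr * j) (s_col + dc * j) := by
        intro j hj
        apply pvGetAt_pvAddAt_ne
        left
        have hja := hlt j hj
        have hjb := hinb j (by simp [hj])
        rcases hdr with rfl | rfl <;> omega
      have hok' : ∀ i ∈ t, (∀ j ∈ t, j < i → pvGetAt b' (s_row + dr * j) (s_col + dc * j) = -50) →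
          pvCellOk b' (s_row + dr * i) (s_col + dc * i) := by
        intro i hi hprev
        rw [hb', pvOk_pvAddAt]
        apply hok i (by simp [hi])
        intro j hj hji
        rcases List.mem_cons.mp hj with rfl | hjt
        · exact hv
        · rw [← hvals j hjt]; exact hprev j hjt hji
      rw [ih b' (List.pairwise_cons.mp hasc).2 (fun i hi => hinb i (by simp [hi])) hok' hl3,
          pvTakeStop_congr b' b s_row s_col dr dc t (fun i hi => hvals i hi)]
      rw [hb']
      simp only [List.foldl_cons]

-- the interval [pvLo, pvHi] is exactly the set of in-range in-bounds steps
theorem pvInterval_char (s_row s_col row column dr dc : Int)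
    (hdr : dr = 1 ∨ dr = -1) (hdc : dc = 1 ∨ dc = -1) (i : Int) :
    (1 ≤ i ∧ i < column ∧ 0 ≤ s_row + dr * i ∧ s_row + dr * i < row ∧
      0 ≤ s_col + dc * i ∧ s_col + dc * i < column)
    ↔ (pvLo s_row s_col row column dr dc ≤ i ∧ i ≤ pvHi s_row s_col row column dr dc) := by
  rcases hdr with rfl | rfl <;> rcases hdc with rfl | rfl <;>
    simp only [pvLo, pvHi] <;> norm_num <;> omega

theorem pvLo_ge_one (s_row s_col row column dr dc : Int) :
    1 ≤ pvLo s_row s_col row column dr dc := by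
  unfold pvLo; omega

theorem pvHi_le (s_row s_col row column dr dc : Int) :
    pvHi s_row s_col row column dr dc ≤ column - 1 := by
  unfold pvHi; omega

-- the bounded pvPreDir implies the unbounded per-step condition on the whole interval
theorem pvPreDir_full (b : List (List Int)) (s_row s_col row column dr dc : Int)
    (hdr : dr = 1 ∨ dr = -1) (hdc : dc = 1 ∨ dc = -1)
    (hpre : pvPreDir b s_row s_col row column dr dc) :
    ∀ i, pvLo s_row s_col row column dr dc ≤ i → i ≤ pvHi s_row s_col row column dr dc →
      (∀ j, pvLo s_row s_col row column dr dc ≤ j → j < i →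
        pvGetAt b (s_row + dr * j) (s_col + dc * j) = -50) →
      pvCellOk b (s_row + dr * i) (s_col + dc * i) := by
  set lo := pvLo s_row s_col row column dr dc with hlo
  set hi := pvHi s_row s_col row column dr dc with hhi
  intro i h1 h2 hprem
  by_cases hcap : i ≤ lo + (b.length : Int)
  · exact hpre i (PySem.List.mem_pyRange_one.mpr (by omega))
      (fun j hj => hprem j (PySem.List.mem_pyRange_one.mp hj).1 (PySem.List.mem_pyRange_one.mp hj).2)
  · exfalso
    have hv1 := hprem lo le_rfl (by omega)
    have hv2 := hprem (lo + (b.length : Int)) (by omega) (by omega)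
    have ok1 : pvCellOk b (s_row + dr * lo) (s_col + dc * lo) := by
      by_contra hc
      rw [pvGetAt_not_ok b _ _ hc] at hv1
      omega
    have ok2 : pvCellOk b (s_row + dr * (lo + (b.length : Int))) (s_col + dc * (lo + (b.length : Int))) := by
      by_contra hc
      rw [pvGetAt_not_ok b _ _ hc] at hv2
      omega
    have hb1 := (pvInterval_char s_row s_col row column dr dc hdr hdc lo).mpr (by omega)
    have hb2 := (pvInterval_char s_row s_col row column dr dc hdr hdc (lo + (b.length : Int))).mpr (by omega)
    obtain ⟨o1, -⟩ := ok1
    obtain ⟨o2, -⟩ := ok2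
    rcases hdr with rfl | rfl <;> omega

theorem pvLen_foldl (s_row s_col dr dc : Int) (L : List Int) (b : List (List Int)) :
    (L.foldl (fun b2 i => pvAddAt b2 (s_row + dr * i) (s_col + dc * i)) b).length = b.length := by
  induction L generalizing b with
  | nil => rfl
  | cons a t ih => simp only [List.foldl_cons]; rw [ih, pvAddAt_length]

theorem pvLen_phaseB (s_row s_col row column dr dc : Int) (b : List (List Int)) :
    (pvPhaseB s_row s_col row column dr dc b).length = b.length := by
  unfold pvPhaseB
  exact pvLen_foldl s_row s_col dr dc _ b

-- one full ray of A equals one phase of B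
theorem pvPhase_eq (s_row s_col row column dr dc : Int) (b : List (List Int))
    (hdr : dr = 1 ∨ dr = -1) (hdc : dc = 1 ∨ dc = -1)
    (hpre : pvPreDir b s_row s_col row column dr dc) :
    pvRunDir s_row s_col row column dr dc (PySem.List.pyRange 1 column 1) b
      = pvPhaseB s_row s_col row column dr dc b := by
  set lo := pvLo s_row s_col row column dr dc with hlo
  set hi := pvHi s_row s_col row column dr dc with hhi
  have hchar := pvInterval_char s_row s_col row column dr dc hdr hdc
  have hlo1 : 1 ≤ lo := pvLo_ge_one s_row s_col row column dr dc
  have hhic : hi ≤ column - 1 := pvHi_le s_row s_col row column dr dc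
  by_cases hle : lo ≤ hi
  · -- nonempty interval: split the range into skip ++ middle ++ skip
    have hsplit1 : PySem.List.pyRange 1 column 1
        = PySem.List.pyRange 1 lo 1 ++ PySem.List.pyRange lo column 1 :=
      PySem.List.pyRange_one_append 1 lo column hlo1 (by omega)
    have hsplit2 : PySem.List.pyRange lo column 1
        = PySem.List.pyRange lo (hi + 1) 1 ++ PySem.List.pyRange (hi + 1) column 1 :=
      PySem.List.pyRange_one_append lo (hi + 1) column (by omega) (by omega)
    rw [hsplit1, hsplit2]
    rw [pvRunDir_append_skip _ _ _ _ _ _ _ _ _ (by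
      intro i hi2
      have hm := PySem.List.mem_pyRange_one.mp hi2
      intro hb2
      have : lo ≤ i ∧ i ≤ hi := (hchar i).mp ⟨hm.1, by omega, hb2.1, hb2.2.1, hb2.2.2.1, hb2.2.2.2⟩
      omega)]
    rw [pvRunDir_eq_takeStop s_row s_col row column dr dc _ _ hdr b
      (PySem.List.pairwise_lt_pyRange_one lo (hi + 1))
      (fun i hi2 => by
        have hm := PySem.List.mem_pyRange_one.mp hi2
        have := (hchar i).mpr ⟨hm.1, by omega⟩
        exact ⟨this.2.2.1, this.2.2.2.1, this.2.2.2.2.1, this.2.2.2.2.2⟩)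
      (fun i hi2 hprev => by
        have hm := PySem.List.mem_pyRange_one.mp hi2
        apply pvPreDir_full b s_row s_col row column dr dc hdr hdc hpre i hm.1 (by omega)
        intro j hj1 hj2
        exact hprev j (PySem.List.mem_pyRange_one.mpr (by omega)) hj2)
      (fun i hi2 => by
        have hm := PySem.List.mem_pyRange_one.mp hi2
        intro hb2
        have : lo ≤ i ∧ i ≤ hi := (hchar i).mp ⟨by omega, hm.2, hb2.1, hb2.2.1, hb2.2.2.1, hb2.2.2.2⟩
        omega)]
    unfold pvPhaseB
    rw [← hlo, ← hhi,
        pvFindStop_range b s_row s_col dr dc hi (hi + 1 - lo).toNat lo le_rfl]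
  · -- empty interval: A's ray never passes the bounds check, B's ranges are empty
    have hnil : PySem.List.pyRange lo (hi + 1) 1 = [] := PySem.List.pyRange_one_eq_nil (by omega)
    rw [pvRunDir_skip _ _ _ _ _ _ _ _ (by
      intro i hi2
      have hm := PySem.List.mem_pyRange_one.mp hi2
      intro hb2
      have : lo ≤ i ∧ i ≤ hi := (hchar i).mp ⟨hm.1, hm.2, hb2.1, hb2.2.1, hb2.2.2.1, hb2.2.2.2⟩
      omega)]
    unfold pvPhaseB
    rw [← hlo, ← hhi, hnil]
    simp only [pvFindStop]
    rw [PySem.List.pyRange_one_eq_nil (by omega)]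
    rfl

-- a phase of B preserves the shape of the board …
theorem pvOk_phaseB (s_row s_col row column dr dc : Int) (b : List (List Int)) (r c : Int) :
    pvCellOk (pvPhaseB s_row s_col row column dr dc b) r c ↔ pvCellOk b r c := by
  unfold pvPhaseB
  exact pvOk_foldl s_row s_col dr dc _ b r c

-- … and every value off the cells of its own interval
theorem pvGetAt_phaseB_ne (s_row s_col row column dr dc : Int) (b : List (List Int)) (r c : Int)
    (h : ∀ i, pvLo s_row s_col row column dr dc ≤ i → i ≤ pvHi s_row s_col row column dr dc →
      (s_row + dr * i).toNat ≠ r.toNat ∨ (s_col + dc * i).toNat ≠ c.toNat) :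
    pvGetAt (pvPhaseB s_row s_col row column dr dc b) r c = pvGetAt b r c := by
  unfold pvPhaseB
  apply pvGetAt_foldl_ne
  intro i hi2
  have hm := PySem.List.mem_pyRange_one.mp hi2
  have hle : pvFindStop b s_row s_col dr dc
      (PySem.List.pyRange (pvLo s_row s_col row column dr dc) (pvHi s_row s_col row column dr dc + 1) 1)
      (pvHi s_row s_col row column dr dc) ≤ pvHi s_row s_col row column dr dc :=
    pvFindStop_le b s_row s_col dr dc _ _ _
      (fun x hx => by have := (PySem.List.mem_pyRange_one.mp hx).2; omega) le_rfl
  exact h i hm.1 (by omega)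

-- transfer the per-diagonal precondition across board changes that keep the shape
-- and the diagonal's values
theorem pvPreDir_transfer (s_row s_col row column dr dc : Int) (b b' : List (List Int))
    (hdr : dr = 1 ∨ dr = -1) (hdc : dc = 1 ∨ dc = -1)
    (hlen : b'.length = b.length)
    (hok : ∀ r c, pvCellOk b' r c ↔ pvCellOk b r c)
    (hval : ∀ i, pvLo s_row s_col row column dr dc ≤ i → i ≤ pvHi s_row s_col row column dr dc →
      pvGetAt b' (s_row + dr * i) (s_col + dc * i) = pvGetAt b (s_row + dr * i) (s_col + dc * i))
    (hpre : pvPreDir b s_row s_col row column dr dc) :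
    pvPreDir b' s_row s_col row column dr dc := by
  intro i hi hprev
  rw [hlen] at hi
  have hm := PySem.List.mem_pyRange_one.mp hi
  rw [hok]
  apply hpre i hi
  intro j hj
  have hmj := PySem.List.mem_pyRange_one.mp hj
  rw [← hval j hmj.1 (by omega)]
  exact hprev j hj

-- ===== A-SPLIT MACHINERY: the interleaved four-flag loop of A equals four sequential rays =====

-- one guarded "+= 50 then test" step on the combined state (board, four flags);
-- g reads the step's own flag, u writes it.
def pvStep (row column r c : Int) (g : Bool × Bool × Bool × Bool → Bool)
    (u : Bool × Bool × Bool × Bool → Bool → Bool × Bool × Bool × Bool)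
    (s : List (List Int) × Bool × Bool × Bool × Bool) : List (List Int) × Bool × Bool × Bool × Bool :=
  if 0 ≤ r ∧ r < row ∧ 0 ≤ c ∧ c < column ∧ g s.2 = true then
    let b' := pvAddAt s.1 r c
    (b', if pvGetAt b' r c ≠ 0 then u s.2 false else s.2)
  else s

theorem pvAddAt_comm (b : List (List Int)) (r1 c1 r2 c2 : Int)
    (h : r1.toNat ≠ r2.toNat ∨ c1.toNat ≠ c2.toNat) :
    pvAddAt (pvAddAt b r1 c1) r2 c2 = pvAddAt (pvAddAt b r2 c2) r1 c1 := by
  unfold pvAddAt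
  rcases eq_or_ne r1.toNat r2.toNat with he | hne
  · have hc : c1.toNat ≠ c2.toNat := by
      rcases h with h | h
      · exact absurd he h
      · exact h
    rw [he, pvModify_modify_same, pvModify_modify_same]
    congr 1
    funext rw_
    exact pvModify_comm _ _ _ _ _ hc
  · exact pvModify_comm _ _ _ _ _ hne

-- the three possible outcomes of a single step
theorem pvStep_oob (row column r c : Int) (g : Bool × Bool × Bool × Bool → Bool)
    (u : Bool × Bool × Bool × Bool → Bool → Bool × Bool × Bool × Bool)
    (s : List (List Int) × Bool × Bool × Bool × Bool)
    (h : ¬(0 ≤ r ∧ r < row ∧ 0 ≤ c ∧ c < column)) :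
    pvStep row column r c g u s = s := by
  simp only [pvStep]
  exact if_neg (fun hh => h ⟨hh.1, hh.2.1, hh.2.2.1, hh.2.2.2.1⟩)

theorem pvStep_ff (row column r c : Int) (g : Bool × Bool × Bool × Bool → Bool)
    (u : Bool × Bool × Bool × Bool → Bool → Bool × Bool × Bool × Bool)
    (s : List (List Int) × Bool × Bool × Bool × Bool) (h : ¬ g s.2 = true) :
    pvStep row column r c g u s = s := by
  simp only [pvStep]
  exact if_neg (fun hh => h hh.2.2.2.2)

theorem pvStep_fire (row column r c : Int) (g : Bool × Bool × Bool × Bool → Bool)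
    (u : Bool × Bool × Bool × Bool → Bool → Bool × Bool × Bool × Bool)
    (s : List (List Int) × Bool × Bool × Bool × Bool)
    (hb : 0 ≤ r ∧ r < row ∧ 0 ≤ c ∧ c < column) (hf : g s.2 = true) :
    pvStep row column r c g u s
      = (pvAddAt s.1 r c, if pvGetAt (pvAddAt s.1 r c) r c ≠ 0 then u s.2 false else s.2) := by
  simp only [pvStep]
  rw [if_pos ⟨hb.1, hb.2.1, hb.2.2.1, hb.2.2.2, hf⟩]

theorem pvStep_flag_other (row column r c : Int) (g g' : Bool × Bool × Bool × Bool → Bool)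
    (u : Bool × Bool × Bool × Bool → Bool → Bool × Bool × Bool × Bool)
    (h : ∀ F x, g' (u F x) = g' F) (s : List (List Int) × Bool × Bool × Bool × Bool) :
    g' ((pvStep row column r c g u s).2) = g' s.2 := by
  simp only [pvStep]
  split_ifs <;> simp [h]

-- two steps at disjoint cells, touching different flags, commute
theorem pvStep_comm (row column r1 c1 r2 c2 : Int)
    (g1 g2 : Bool × Bool × Bool × Bool → Bool)
    (u1 u2 : Bool × Bool × Bool × Bool → Bool → Bool × Bool × Bool × Bool)
    (hg12 : ∀ F x, g1 (u2 F x) = g1 F) (hg21 : ∀ F x, g2 (u1 F x) = g2 F)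
    (hu : ∀ F x y, u1 (u2 F y) x = u2 (u1 F x) y)
    (hcell : (0 ≤ r1 ∧ r1 < row ∧ 0 ≤ c1 ∧ c1 < column) →
             (0 ≤ r2 ∧ r2 < row ∧ 0 ≤ c2 ∧ c2 < column) →
             r1.toNat ≠ r2.toNat ∨ c1.toNat ≠ c2.toNat)
    (s : List (List Int) × Bool × Bool × Bool × Bool) :
    pvStep row column r2 c2 g2 u2 (pvStep row column r1 c1 g1 u1 s)
      = pvStep row column r1 c1 g1 u1 (pvStep row column r2 c2 g2 u2 s) := by
  by_cases hb1 : 0 ≤ r1 ∧ r1 < row ∧ 0 ≤ c1 ∧ c1 < column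
  · by_cases hb2 : 0 ≤ r2 ∧ r2 < row ∧ 0 ≤ c2 ∧ c2 < column
    · by_cases hf1 : g1 s.2 = true
      · by_cases hf2 : g2 s.2 = true
        · -- both steps fire
          have hd := hcell hb1 hb2
          have hd' : r2.toNat ≠ r1.toNat ∨ c2.toNat ≠ c1.toNat := by tauto
          rw [pvStep_fire row column r1 c1 g1 u1 s hb1 hf1,
              pvStep_fire row column r2 c2 g2 u2 s hb2 hf2,
              pvStep_fire row column r2 c2 g2 u2 _ hb2 (by
                by_cases hv : pvGetAt (pvAddAt s.1 r1 c1) r1 c1 ≠ 0 <;> simp [hv, hg21, hf2]),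
              pvStep_fire row column r1 c1 g1 u1 _ hb1 (by
                by_cases hv : pvGetAt (pvAddAt s.1 r2 c2) r2 c2 ≠ 0 <;> simp [hv, hg12, hf1])]
          have hread2 : pvGetAt (pvAddAt (pvAddAt s.1 r1 c1) r2 c2) r2 c2
              = pvGetAt (pvAddAt s.1 r2 c2) r2 c2 := by
            rw [pvAddAt_comm _ r1 c1 r2 c2 hd, pvGetAt_pvAddAt_ne _ r2 c2 r1 c1 hd']
          have hread1 : pvGetAt (pvAddAt (pvAddAt s.1 r2 c2) r1 c1) r1 c1
              = pvGetAt (pvAddAt s.1 r1 c1) r1 c1 := by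
            rw [pvAddAt_comm _ r2 c2 r1 c1 hd', pvGetAt_pvAddAt_ne _ r1 c1 r2 c2 hd]
          simp only [hread1, hread2]
          rw [Prod.ext_iff]
          constructor
          · exact pvAddAt_comm s.1 r1 c1 r2 c2 hd
          · simp only []
            by_cases hx1 : pvGetAt (pvAddAt s.1 r1 c1) r1 c1 ≠ 0 <;>
              by_cases hx2 : pvGetAt (pvAddAt s.1 r2 c2) r2 c2 ≠ 0 <;>
              simp [hx1, hx2, hu]
        · -- step 2 never fires (its flag is down, and step 1 does not touch it)
          rw [pvStep_ff row column r2 c2 g2 u2 s hf2,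
              pvStep_ff row column r2 c2 g2 u2 (pvStep row column r1 c1 g1 u1 s) (by
                rw [pvStep_flag_other row column r1 c1 g1 g2 u1 hg21 s]; exact hf2)]
      · -- step 1 never fires
        rw [pvStep_ff row column r1 c1 g1 u1 s hf1,
            pvStep_ff row column r1 c1 g1 u1 (pvStep row column r2 c2 g2 u2 s) (by
              rw [pvStep_flag_other row column r2 c2 g2 g1 u2 hg12 s]; exact hf1)]
    · -- step 2 out of bounds
      rw [pvStep_oob row column r2 c2 g2 u2 s hb2,
          pvStep_oob row column r2 c2 g2 u2 (pvStep row column r1 c1 g1 u1 s) hb2]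
  · -- step 1 out of bounds
    rw [pvStep_oob row column r1 c1 g1 u1 s hb1,
        pvStep_oob row column r1 c1 g1 u1 (pvStep row column r2 c2 g2 u2 s) hb1]

-- pulling a pointwise-commuting function out of a foldl
theorem pvFoldl_out {σ : Type} (f : σ → Int → σ) (g : σ → σ) (l : List Int)
    (h : ∀ i ∈ l, ∀ s, g (f s i) = f (g s) i) (s : σ) :
    l.foldl f (g s) = g (l.foldl f s) := by
  induction l generalizing s with
  | nil => rfl
  | cons a t ih =>
    simp only [List.foldl_cons]
    rw [← h a (by simp) s, ih (fun i hi s => h i (by simp [hi]) s)]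

-- an interleaved fold of two commuting step families splits into two sequential folds
theorem pvFoldl_split {σ : Type} (f g : σ → Int → σ) (l : List Int)
    (h : ∀ i ∈ l, ∀ j ∈ l, ∀ s, g (f s i) j = f (g s j) i) (s : σ) :
    l.foldl (fun s i => g (f s i) i) s = l.foldl g (l.foldl f s) := by
  induction l generalizing s with
  | nil => rfl
  | cons a t ih =>
    simp only [List.foldl_cons]
    rw [ih (fun i hi j hj s => h i (by simp [hi]) j (by simp [hj]) s)]
    congr 1
    rw [pvFoldl_out f (fun s => g s a) t
          (fun i hi s => h i (by simp [hi]) a (by simp) s) (f s a)]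

-- a phase whose flag is already false does nothing
theorem pvPhase_false (s_row s_col row column dr dc : Int)
    (g : Bool × Bool × Bool × Bool → Bool) (u : Bool × Bool × Bool × Bool → Bool → Bool × Bool × Bool × Bool)
    (l : List Int) (s : List (List Int) × Bool × Bool × Bool × Bool) (hf : g s.2 ≠ true) :
    l.foldl (fun s i => pvStep row column (s_row + dr * i) (s_col + dc * i) g u s) s = s := by
  induction l generalizing s with
  | nil => rfl
  | cons a t ih =>
    simp only [List.foldl_cons]
    rw [pvStep_ff row column _ _ g u s hf]
    exact ih s hf

-- one flagged phase computes exactly pvRunDir on the board component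
theorem pvPhase_runDir (s_row s_col row column dr dc : Int)
    (g : Bool × Bool × Bool × Bool → Bool) (u : Bool × Bool × Bool × Bool → Bool → Bool × Bool × Bool × Bool)
    (hgu : ∀ F x, g (u F x) = x)
    (l : List Int) (s : List (List Int) × Bool × Bool × Bool × Bool) (hf : g s.2 = true) :
    (l.foldl (fun s i => pvStep row column (s_row + dr * i) (s_col + dc * i) g u s) s).1
      = pvRunDir s_row s_col row column dr dc l s.1 := by
  induction l generalizing s with
  | nil => rfl
  | cons a t ih =>
    obtain ⟨b, F⟩ := s
    simp only [List.foldl_cons, pvRunDir]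
    by_cases hbb : 0 ≤ s_row + dr * a ∧ s_row + dr * a < row ∧ 0 ≤ s_col + dc * a ∧ s_col + dc * a < column
    · rw [if_pos hbb, pvStep_fire row column _ _ g u (b, F) hbb hf]
      by_cases hv : pvGetAt (pvAddAt b (s_row + dr * a) (s_col + dc * a)) (s_row + dr * a) (s_col + dc * a) ≠ 0
      · simp only [if_pos hv]
        rw [pvPhase_false s_row s_col row column dr dc g u t
              (pvAddAt b (s_row + dr * a) (s_col + dc * a), u F false) (by simp [hgu])]
      · simp only [if_neg hv]
        exact ih (pvAddAt b (s_row + dr * a) (s_col + dc * a), F) hf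
    · rw [if_neg hbb, pvStep_oob row column _ _ g u (b, F) hbb]
      exact ih (b, F) hf

-- a phase leaves every other flag unchanged
theorem pvPhase_other (s_row s_col row column dr dc : Int)
    (g g' : Bool × Bool × Bool × Bool → Bool) (u : Bool × Bool × Bool × Bool → Bool → Bool × Bool × Bool × Bool)
    (h : ∀ F x, g' (u F x) = g' F)
    (l : List Int) (s : List (List Int) × Bool × Bool × Bool × Bool) :
    g' ((l.foldl (fun s i => pvStep row column (s_row + dr * i) (s_col + dc * i) g u s) s).2) = g' s.2 := by
  induction l generalizing s with
  | nil => rfl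
  | cons a t ih =>
    simp only [List.foldl_cons]
    rw [ih]
    simp only [pvStep]
    split_ifs <;> simp [h]

def pvG1 : Bool × Bool × Bool × Bool → Bool := fun F => F.1
def pvG2 : Bool × Bool × Bool × Bool → Bool := fun F => F.2.1
def pvG3 : Bool × Bool × Bool × Bool → Bool := fun F => F.2.2.1
def pvG4 : Bool × Bool × Bool × Bool → Bool := fun F => F.2.2.2
def pvU1 : Bool × Bool × Bool × Bool → Bool → Bool × Bool × Bool × Bool := fun F x => (x, F.2)
def pvU2 : Bool × Bool × Bool × Bool → Bool → Bool × Bool × Bool × Bool := fun F x => (F.1, x, F.2.2)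
def pvU3 : Bool × Bool × Bool × Bool → Bool → Bool × Bool × Bool × Bool := fun F x => (F.1, F.2.1, x, F.2.2.2)
def pvU4 : Bool × Bool × Bool × Bool → Bool → Bool × Bool × Bool × Bool := fun F x => (F.1, F.2.1, F.2.2.1, x)

theorem pvStepChar1 (row column r c : Int) (b : List (List Int)) (f1 f2 f3 f4 : Bool) :
    pvStep row column r c pvG1 pvU1 (b, f1, f2, f3, f4)
      = ((if 0 ≤ r ∧ r < row ∧ 0 ≤ c ∧ c < column ∧ f1 = true then
            (pvAddAt b r c, if pvGetAt (pvAddAt b r c) r c ≠ 0 then false else f1)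
          else (b, f1)).1, (if 0 ≤ r ∧ r < row ∧ 0 ≤ c ∧ c < column ∧ f1 = true then
            (pvAddAt b r c, if pvGetAt (pvAddAt b r c) r c ≠ 0 then false else f1)
          else (b, f1)).2, f2, f3, f4) := by
  simp only [pvStep, pvG1, pvU1]
  split_ifs <;> rfl

theorem pvStepChar2 (row column r c : Int) (b : List (List Int)) (f1 f2 f3 f4 : Bool) :
    pvStep row column r c pvG2 pvU2 (b, f1, f2, f3, f4)
      = ((if 0 ≤ r ∧ r < row ∧ 0 ≤ c ∧ c < column ∧ f2 = true then
            (pvAddAt b r c, if pvGetAt (pvAddAt b r c) r c ≠ 0 then false else f2)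
          else (b, f2)).1, f1, (if 0 ≤ r ∧ r < row ∧ 0 ≤ c ∧ c < column ∧ f2 = true then
            (pvAddAt b r c, if pvGetAt (pvAddAt b r c) r c ≠ 0 then false else f2)
          else (b, f2)).2, f3, f4) := by
  simp only [pvStep, pvG2, pvU2]
  split_ifs <;> rfl

theorem pvStepChar3 (row column r c : Int) (b : List (List Int)) (f1 f2 f3 f4 : Bool) :
    pvStep row column r c pvG3 pvU3 (b, f1, f2, f3, f4)
      = ((if 0 ≤ r ∧ r < row ∧ 0 ≤ c ∧ c < column ∧ f3 = true then
            (pvAddAt b r c, if pvGetAt (pvAddAt b r c) r c ≠ 0 then false else f3)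
          else (b, f3)).1, f1, f2, (if 0 ≤ r ∧ r < row ∧ 0 ≤ c ∧ c < column ∧ f3 = true then
            (pvAddAt b r c, if pvGetAt (pvAddAt b r c) r c ≠ 0 then false else f3)
          else (b, f3)).2, f4) := by
  simp only [pvStep, pvG3, pvU3]
  split_ifs <;> rfl

theorem pvStepChar4 (row column r c : Int) (b : List (List Int)) (f1 f2 f3 f4 : Bool) :
    pvStep row column r c pvG4 pvU4 (b, f1, f2, f3, f4)
      = ((if 0 ≤ r ∧ r < row ∧ 0 ≤ c ∧ c < column ∧ f4 = true then
            (pvAddAt b r c, if pvGetAt (pvAddAt b r c) r c ≠ 0 then false else f4)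
          else (b, f4)).1, f1, f2, f3, (if 0 ≤ r ∧ r < row ∧ 0 ≤ c ∧ c < column ∧ f4 = true then
            (pvAddAt b r c, if pvGetAt (pvAddAt b r c) r c ≠ 0 then false else f4)
          else (b, f4)).2) := by
  simp only [pvStep, pvG4, pvU4]
  split_ifs <;> rfl

-- A's loop body is the composition of the four single-diagonal steps
theorem pvBody_eq (s_row s_col row column : Int) :
    (fun (st : List (List Int) × Bool × Bool × Bool × Bool) (i : Int) =>
      let b0 := st.1
      let pospos := st.2.1
      let negneg := st.2.2.1
      let posneg := st.2.2.2.1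
      let negpos := st.2.2.2.2
      let p1 :=
        if 0 ≤ s_row + i ∧ s_row + i < row ∧ 0 ≤ s_col + i ∧ s_col + i < column ∧ pospos = true then
          let b' := pvAddAt b0 (s_row + i) (s_col + i)
          (b', if pvGetAt b' (s_row + i) (s_col + i) ≠ 0 then false else pospos)
        else (b0, pospos)
      let p2 :=
        if 0 ≤ s_row - i ∧ s_row - i < row ∧ 0 ≤ s_col - i ∧ s_col - i < column ∧ negneg = true then
          let b' := pvAddAt p1.1 (s_row - i) (s_col - i)
          (b', if pvGetAt b' (s_row - i) (s_col - i) ≠ 0 then false else negneg)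
        else (p1.1, negneg)
      let p3 :=
        if 0 ≤ s_row + i ∧ s_row + i < row ∧ 0 ≤ s_col - i ∧ s_col - i < column ∧ posneg = true then
          let b' := pvAddAt p2.1 (s_row + i) (s_col - i)
          (b', if pvGetAt b' (s_row + i) (s_col - i) ≠ 0 then false else posneg)
        else (p2.1, posneg)
      let p4 :=
        if 0 ≤ s_row - i ∧ s_row - i < row ∧ 0 ≤ s_col + i ∧ s_col + i < column ∧ negpos = true then
          let b' := pvAddAt p3.1 (s_row - i) (s_col + i)
          (b', if pvGetAt b' (s_row - i) (s_col + i) ≠ 0 then false else negpos)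
        else (p3.1, negpos)
      ((p4.1, p1.2, p2.2, p3.2, p4.2) : List (List Int) × Bool × Bool × Bool × Bool)) =
    (fun (st : List (List Int) × Bool × Bool × Bool × Bool) (i : Int) =>
      pvStep row column (s_row - i) (s_col + i) pvG4 pvU4
        (pvStep row column (s_row + i) (s_col - i) pvG3 pvU3
          (pvStep row column (s_row - i) (s_col - i) pvG2 pvU2
            (pvStep row column (s_row + i) (s_col + i) pvG1 pvU1 st)))) := by
  funext st i
  obtain ⟨b, f1, f2, f3, f4⟩ := st
  conv_rhs => rw [pvStepChar1, pvStepChar2, pvStepChar3, pvStepChar4]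

-- A equals the four rays run one after the other, in A's flag order
theorem pvA_phases (board : List (List Int)) (s_row s_col row column : Int) :
    bishop_moves board s_row s_col row column
      = pvRunDir s_row s_col row column (-1) 1 (PySem.List.pyRange 1 column 1)
          (pvRunDir s_row s_col row column 1 (-1) (PySem.List.pyRange 1 column 1)
            (pvRunDir s_row s_col row column (-1) (-1) (PySem.List.pyRange 1 column 1)
              (pvRunDir s_row s_col row column 1 1 (PySem.List.pyRange 1 column 1) board))) := by
  unfold bishop_moves
  rw [pvBody_eq s_row s_col row column]
  set l := PySem.List.pyRange 1 column 1 with hl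
  have hm : ∀ i ∈ l, (1 : Int) ≤ i := fun i hi => (PySem.List.mem_pyRange_one.mp hi).1
  -- peel the negpos family off the interleaved fold
  have e1 : ∀ (s0 : List (List Int) × Bool × Bool × Bool × Bool),
      List.foldl (fun st i =>
        pvStep row column (s_row - i) (s_col + i) pvG4 pvU4
          (pvStep row column (s_row + i) (s_col - i) pvG3 pvU3
            (pvStep row column (s_row - i) (s_col - i) pvG2 pvU2
              (pvStep row column (s_row + i) (s_col + i) pvG1 pvU1 st)))) s0 l
      = List.foldl (fun st i => pvStep row column (s_row - i) (s_col + i) pvG4 pvU4 st)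
          (List.foldl (fun st i =>
            pvStep row column (s_row + i) (s_col - i) pvG3 pvU3
              (pvStep row column (s_row - i) (s_col - i) pvG2 pvU2
                (pvStep row column (s_row + i) (s_col + i) pvG1 pvU1 st))) s0 l) l := by
    intro s0
    refine pvFoldl_split
      (fun st i =>
        pvStep row column (s_row + i) (s_col - i) pvG3 pvU3
          (pvStep row column (s_row - i) (s_col - i) pvG2 pvU2
            (pvStep row column (s_row + i) (s_col + i) pvG1 pvU1 st)))
      (fun st i => pvStep row column (s_row - i) (s_col + i) pvG4 pvU4 st) l ?_ s0
    intro i hi j hj s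
    have hi1 := hm i hi
    have hj1 := hm j hj
    beta_reduce
    rw [pvStep_comm row column (s_row + i) (s_col - i) (s_row - j) (s_col + j) pvG3 pvG4 pvU3 pvU4
          (fun F x => rfl) (fun F x => rfl) (fun F x y => rfl) (by intro hA hB; omega),
        pvStep_comm row column (s_row - i) (s_col - i) (s_row - j) (s_col + j) pvG2 pvG4 pvU2 pvU4
          (fun F x => rfl) (fun F x => rfl) (fun F x y => rfl) (by intro hA hB; omega),
        pvStep_comm row column (s_row + i) (s_col + i) (s_row - j) (s_col + j) pvG1 pvG4 pvU1 pvU4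
          (fun F x => rfl) (fun F x => rfl) (fun F x y => rfl) (by intro hA hB; omega)]
  -- peel the posneg family
  have e2 : ∀ (s0 : List (List Int) × Bool × Bool × Bool × Bool),
      List.foldl (fun st i =>
        pvStep row column (s_row + i) (s_col - i) pvG3 pvU3
          (pvStep row column (s_row - i) (s_col - i) pvG2 pvU2
            (pvStep row column (s_row + i) (s_col + i) pvG1 pvU1 st))) s0 l
      = List.foldl (fun st i => pvStep row column (s_row + i) (s_col - i) pvG3 pvU3 st)
          (List.foldl (fun st i =>
            pvStep row column (s_row - i) (s_col - i) pvG2 pvU2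
              (pvStep row column (s_row + i) (s_col + i) pvG1 pvU1 st)) s0 l) l := by
    intro s0
    refine pvFoldl_split
      (fun st i =>
        pvStep row column (s_row - i) (s_col - i) pvG2 pvU2
          (pvStep row column (s_row + i) (s_col + i) pvG1 pvU1 st))
      (fun st i => pvStep row column (s_row + i) (s_col - i) pvG3 pvU3 st) l ?_ s0
    intro i hi j hj s
    have hi1 := hm i hi
    have hj1 := hm j hj
    beta_reduce
    rw [pvStep_comm row column (s_row - i) (s_col - i) (s_row + j) (s_col - j) pvG2 pvG3 pvU2 pvU3
          (fun F x => rfl) (fun F x => rfl) (fun F x y => rfl) (by intro hA hB; omega),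
        pvStep_comm row column (s_row + i) (s_col + i) (s_row + j) (s_col - j) pvG1 pvG3 pvU1 pvU3
          (fun F x => rfl) (fun F x => rfl) (fun F x y => rfl) (by intro hA hB; omega)]
  -- peel the negneg family
  have e3 : ∀ (s0 : List (List Int) × Bool × Bool × Bool × Bool),
      List.foldl (fun st i =>
        pvStep row column (s_row - i) (s_col - i) pvG2 pvU2
          (pvStep row column (s_row + i) (s_col + i) pvG1 pvU1 st)) s0 l
      = List.foldl (fun st i => pvStep row column (s_row - i) (s_col - i) pvG2 pvU2 st)
          (List.foldl (fun st i => pvStep row column (s_row + i) (s_col + i) pvG1 pvU1 st) s0 l) l := by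
    intro s0
    refine pvFoldl_split
      (fun st i => pvStep row column (s_row + i) (s_col + i) pvG1 pvU1 st)
      (fun st i => pvStep row column (s_row - i) (s_col - i) pvG2 pvU2 st) l ?_ s0
    intro i hi j hj s
    have hi1 := hm i hi
    have hj1 := hm j hj
    beta_reduce
    rw [pvStep_comm row column (s_row + i) (s_col + i) (s_row - j) (s_col - j) pvG1 pvG2 pvU1 pvU2
          (fun F x => rfl) (fun F x => rfl) (fun F x y => rfl) (by intro hA hB; omega)]
  rw [e1, e2, e3]
  -- rewrite each family in the (s_row + dr * i, s_col + dc * i) shape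
  have c1 : (fun (st : List (List Int) × Bool × Bool × Bool × Bool) (i : Int) =>
        pvStep row column (s_row + i) (s_col + i) pvG1 pvU1 st)
      = (fun st i => pvStep row column (s_row + 1 * i) (s_col + 1 * i) pvG1 pvU1 st) := by
    funext st i; simp
  have c2 : (fun (st : List (List Int) × Bool × Bool × Bool × Bool) (i : Int) =>
        pvStep row column (s_row - i) (s_col - i) pvG2 pvU2 st)
      = (fun st i => pvStep row column (s_row + (-1) * i) (s_col + (-1) * i) pvG2 pvU2 st) := by
    funext st i; simp [sub_eq_add_neg]
  have c3 : (fun (st : List (List Int) × Bool × Bool × Bool × Bool) (i : Int) =>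
        pvStep row column (s_row + i) (s_col - i) pvG3 pvU3 st)
      = (fun st i => pvStep row column (s_row + 1 * i) (s_col + (-1) * i) pvG3 pvU3 st) := by
    funext st i; simp [sub_eq_add_neg]
  have c4 : (fun (st : List (List Int) × Bool × Bool × Bool × Bool) (i : Int) =>
        pvStep row column (s_row - i) (s_col + i) pvG4 pvU4 st)
      = (fun st i => pvStep row column (s_row + (-1) * i) (s_col + 1 * i) pvG4 pvU4 st) := by
    funext st i; simp [sub_eq_add_neg]
  rw [c1, c2, c3, c4]
  -- run the four phases
  set A0 : List (List Int) × Bool × Bool × Bool × Bool := (board, true, true, true, true) with hA0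
  set A1 := List.foldl (fun st i => pvStep row column (s_row + 1 * i) (s_col + 1 * i) pvG1 pvU1 st) A0 l with hA1
  set A2 := List.foldl (fun st i => pvStep row column (s_row + (-1) * i) (s_col + (-1) * i) pvG2 pvU2 st) A1 l with hA2
  set A3 := List.foldl (fun st i => pvStep row column (s_row + 1 * i) (s_col + (-1) * i) pvG3 pvU3 st) A2 l with hA3
  have hA1b : A1.1 = pvRunDir s_row s_col row column 1 1 l A0.1 :=
    pvPhase_runDir s_row s_col row column 1 1 pvG1 pvU1 (fun F x => rfl) l A0 rfl
  have hA1f2 : pvG2 A1.2 = true :=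
    (pvPhase_other s_row s_col row column 1 1 pvG1 pvG2 pvU1 (fun F x => rfl) l A0).trans rfl
  have hA1f3 : pvG3 A1.2 = true :=
    (pvPhase_other s_row s_col row column 1 1 pvG1 pvG3 pvU1 (fun F x => rfl) l A0).trans rfl
  have hA1f4 : pvG4 A1.2 = true :=
    (pvPhase_other s_row s_col row column 1 1 pvG1 pvG4 pvU1 (fun F x => rfl) l A0).trans rfl
  have hA2b : A2.1 = pvRunDir s_row s_col row column (-1) (-1) l A1.1 :=
    pvPhase_runDir s_row s_col row column (-1) (-1) pvG2 pvU2 (fun F x => rfl) l A1 hA1f2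
  have hA2f3 : pvG3 A2.2 = true :=
    (pvPhase_other s_row s_col row column (-1) (-1) pvG2 pvG3 pvU2 (fun F x => rfl) l A1).trans hA1f3
  have hA2f4 : pvG4 A2.2 = true :=
    (pvPhase_other s_row s_col row column (-1) (-1) pvG2 pvG4 pvU2 (fun F x => rfl) l A1).trans hA1f4
  have hA3b : A3.1 = pvRunDir s_row s_col row column 1 (-1) l A2.1 :=
    pvPhase_runDir s_row s_col row column 1 (-1) pvG3 pvU3 (fun F x => rfl) l A2 hA2f3
  have hA3f4 : pvG4 A3.2 = true :=
    (pvPhase_other s_row s_col row column 1 (-1) pvG3 pvG4 pvU3 (fun F x => rfl) l A2).trans hA2f4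
  have hA4b : (List.foldl (fun st i => pvStep row column (s_row + (-1) * i) (s_col + 1 * i) pvG4 pvU4 st) A3 l).1
      = pvRunDir s_row s_col row column (-1) 1 l A3.1 :=
    pvPhase_runDir s_row s_col row column (-1) 1 pvG4 pvU4 (fun F x => rfl) l A3 hA3f4
  rw [hA4b, hA3b, hA2b, hA1b]

-- ===== VERDICT (by name: the statement is the Claim_ definition above) =====
theorem bishop_moves_spec : Claim_equal_bishop_moves := by
  intro board s_row s_col row column _ hpre
  obtain ⟨hp1, hp2, hp3, hp4⟩ := hpre
  unfold Spec_bishop_moves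
  rw [pvA_phases]
  have hB : bishop_moves_alt board s_row s_col row column
      = pvPhaseB s_row s_col row column (-1) 1
          (pvPhaseB s_row s_col row column 1 (-1)
            (pvPhaseB s_row s_col row column (-1) (-1)
              (pvPhaseB s_row s_col row column 1 1 board))) := rfl
  rw [hB]
  -- phase 1
  rw [pvPhase_eq s_row s_col row column 1 1 board (Or.inl rfl) (Or.inl rfl) hp1]
  -- phase 2
  have hp2' : pvPreDir (pvPhaseB s_row s_col row column 1 1 board) s_row s_col row column (-1) (-1) := by
    apply pvPreDir_transfer s_row s_col row column (-1) (-1) board _ (Or.inr rfl) (Or.inr rfl)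
      (pvLen_phaseB s_row s_col row column 1 1 board)
      (fun r c => pvOk_phaseB s_row s_col row column 1 1 board r c) ?_ hp2
    intro k hk1 hk2
    have hck := (pvInterval_char s_row s_col row column (-1) (-1) (Or.inr rfl) (Or.inr rfl) k).mpr ⟨hk1, hk2⟩
    apply pvGetAt_phaseB_ne
    intro i hlo hhi
    have hci := (pvInterval_char s_row s_col row column 1 1 (Or.inl rfl) (Or.inl rfl) i).mpr ⟨hlo, hhi⟩
    left
    omega
  rw [pvPhase_eq s_row s_col row column (-1) (-1) _ (Or.inr rfl) (Or.inr rfl) hp2']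
  -- phase 3
  have hp3' : pvPreDir (pvPhaseB s_row s_col row column (-1) (-1)
      (pvPhaseB s_row s_col row column 1 1 board)) s_row s_col row column 1 (-1) := by
    apply pvPreDir_transfer s_row s_col row column 1 (-1) board _ (Or.inl rfl) (Or.inr rfl)
      (by rw [pvLen_phaseB, pvLen_phaseB])
      (fun r c => by rw [pvOk_phaseB, pvOk_phaseB]) ?_ hp3
    intro k hk1 hk2
    have hck := (pvInterval_char s_row s_col row column 1 (-1) (Or.inl rfl) (Or.inr rfl) k).mpr ⟨hk1, hk2⟩
    rw [pvGetAt_phaseB_ne s_row s_col row column (-1) (-1)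
        (pvPhaseB s_row s_col row column 1 1 board) (s_row + 1 * k) (s_col + (-1) * k) (by
      intro i hlo hhi
      have hci := (pvInterval_char s_row s_col row column (-1) (-1) (Or.inr rfl) (Or.inr rfl) i).mpr ⟨hlo, hhi⟩
      left
      omega)]
    rw [pvGetAt_phaseB_ne s_row s_col row column 1 1 board (s_row + 1 * k) (s_col + (-1) * k) (by
      intro i hlo hhi
      have hci := (pvInterval_char s_row s_col row column 1 1 (Or.inl rfl) (Or.inl rfl) i).mpr ⟨hlo, hhi⟩
      right
      omega)]
  rw [pvPhase_eq s_row s_col row column 1 (-1) _ (Or.inl rfl) (Or.inr rfl) hp3']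
  -- phase 4
  have hp4' : pvPreDir (pvPhaseB s_row s_col row column 1 (-1)
      (pvPhaseB s_row s_col row column (-1) (-1)
        (pvPhaseB s_row s_col row column 1 1 board))) s_row s_col row column (-1) 1 := by
    apply pvPreDir_transfer s_row s_col row column (-1) 1 board _ (Or.inr rfl) (Or.inl rfl)
      (by rw [pvLen_phaseB, pvLen_phaseB, pvLen_phaseB])
      (fun r c => by rw [pvOk_phaseB, pvOk_phaseB, pvOk_phaseB]) ?_ hp4
    intro k hk1 hk2
    have hck := (pvInterval_char s_row s_col row column (-1) 1 (Or.inr rfl) (Or.inl rfl) k).mpr ⟨hk1, hk2⟩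
    rw [pvGetAt_phaseB_ne s_row s_col row column 1 (-1)
        (pvPhaseB s_row s_col row column (-1) (-1) (pvPhaseB s_row s_col row column 1 1 board))
        (s_row + (-1) * k) (s_col + 1 * k) (by
      intro i hlo hhi
      have hci := (pvInterval_char s_row s_col row column 1 (-1) (Or.inl rfl) (Or.inr rfl) i).mpr ⟨hlo, hhi⟩
      left
      omega)]
    rw [pvGetAt_phaseB_ne s_row s_col row column (-1) (-1)
        (pvPhaseB s_row s_col row column 1 1 board) (s_row + (-1) * k) (s_col + 1 * k) (by
      intro i hlo hhi
      have hci := (pvInterval_char s_row s_col row column (-1) (-1) (Or.inr rfl) (Or.inr rfl) i).mpr ⟨hlo, hhi⟩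
      right
      omega)]
    rw [pvGetAt_phaseB_ne s_row s_col row column 1 1 board (s_row + (-1) * k) (s_col + 1 * k) (by
      intro i hlo hhi
      have hci := (pvInterval_char s_row s_col row column 1 1 (Or.inl rfl) (Or.inl rfl) i).mpr ⟨hlo, hhi⟩
      left
      omega)]
  rw [pvPhase_eq s_row s_col row column (-1) 1 _ (Or.inr rfl) (Or.inl rfl) hp4']
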